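-- pv_equiv track=rewrite | github.com/goudetmarc/video-manager | main.py | _get_series_display_title
-- ===== SOURCE A (Python) =====
-- def _get_series_display_title(episodes: list[dict]) -> str:
--     """
--     Get the display title for a series.
--     Priority: tmdb_original_title > tvdb_name > tmdb_title > series_name
--     Always use original (English) title for consistency.
--     """
--     for ep in episodes:
--         if ep.get("tmdb_original_title"):
--             return ep["tmdb_original_title"]
--     for ep in episodes:
--         if ep.get("tvdb_name"):
--             return ep["tvdb_name"]
--     for ep in episodes:
--         if ep.get("tmdb_title"):
--             return ep["tmdb_title"]
--     for ep in episodes: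
--         if ep.get("series_name"):
--             # Capitalize series name properly
--             return ep["series_name"].title()
--     return "Unknown Series"
-- ===== SOURCE B (Python) =====
-- def _get_series_display_title(episodes: list[dict]) -> str:
--     """One pass over the episodes, keeping a first-seen slot per priority field."""
--     keys = ("tmdb_original_title", "tvdb_name", "tmdb_title", "series_name")
--     slots = [None, None, None, None]
--     for ep in episodes:
--         for i, k in enumerate(keys):
--             if slots[i] is None:
--                 v = ep.get(k)
--                 if v:
--                     slots[i] = v
--     orig, tvdb, tmdb, name = slots
--     if orig is not None:
--         return orig
--     if tvdb is not None:
--         return tvdb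
--     if tmdb is not None:
--         return tmdb
--     if name is not None:
--         return name.title()
--     return "Unknown Series"
-- ===== Notes on version B (the rewrite author's own statement) =====
-- stated objective: alternative
-- what changed: Replaces A's four sequential early-return scans of the episode list by a single pass that records the first truthy value of each of the four priority fields in slots, then picks the highest-priority filled slot (titlecasing only series_name).
import Mathlib
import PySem

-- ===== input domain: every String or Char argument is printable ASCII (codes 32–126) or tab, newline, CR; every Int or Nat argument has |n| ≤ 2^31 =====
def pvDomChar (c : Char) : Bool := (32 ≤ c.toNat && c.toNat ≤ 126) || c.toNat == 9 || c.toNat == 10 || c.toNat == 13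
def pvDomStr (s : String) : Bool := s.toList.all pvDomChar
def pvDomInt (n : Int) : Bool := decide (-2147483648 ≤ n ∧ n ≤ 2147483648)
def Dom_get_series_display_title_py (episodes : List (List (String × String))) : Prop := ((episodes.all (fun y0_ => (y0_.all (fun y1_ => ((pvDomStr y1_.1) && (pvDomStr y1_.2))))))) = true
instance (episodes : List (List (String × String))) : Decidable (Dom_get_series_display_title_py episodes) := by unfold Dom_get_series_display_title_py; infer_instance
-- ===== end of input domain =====

-- B replaces A's four sequential early-return scans by a single pass filling four
-- first-seen slots (one per priority field); same return value, no speed claim.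


-- shared primitive helpers (used by both ports): dict get (first match) and str.title()
-- ep.get(k): first matching key, Python dict lookup
def pvGet (k : String) : List (String × String) → Option String
  | [] => none
  | (k', v) :: rest => if k' == k then some v else pvGet k rest

-- str.title() on ASCII: a letter after a letter is lowercased, otherwise uppercased (exact on the ASCII domain)
def pvTitleChars (prevAlpha : Bool) : List Char → List Char
  | [] => []
  | c :: cs =>
    if PySem.Chars.isalpha c then
      (if prevAlpha then PySem.Chars.lowerChar c else PySem.Chars.upperChar c) :: pvTitleChars true cs
    else
      c :: pvTitleChars false cs

def pvTitle (s : String) : String := String.ofList (pvTitleChars false s.toList)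

-- ===== PORT A =====
-- one 'for ep in episodes: if ep.get(k): return ep[k]' loop
def pvScanA (k : String) : List (List (String × String)) → Option String
  | [] => none
  | ep :: rest =>
    match pvGet k ep with
    | some v => if v ≠ "" then some v else pvScanA k rest
    | none => pvScanA k rest

def get_series_display_title_py (episodes : List (List (String × String))) : String :=
  match pvScanA "tmdb_original_title" episodes with
  | some v => v
  | none =>
    match pvScanA "tvdb_name" episodes with
    | some v => v
    | none =>
      match pvScanA "tmdb_title" episodes with
      | some v => v
      | none =>
        match pvScanA "series_name" episodes with
        | some v => pvTitle v
        | none => "Unknown Series"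

-- ===== PORT B =====
-- fill a slot only if still empty and this episode's field is truthy
def pvFill (s : Option String) (k : String) (ep : List (String × String)) : Option String :=
  match s with
  | some v => some v
  | none =>
    match pvGet k ep with
    | some v => if v ≠ "" then some v else none
    | none => none

def get_series_display_title_py_alt (episodes : List (List (String × String))) : String :=
  let st := episodes.foldl
    (fun (st : Option String × Option String × Option String × Option String) ep =>
      (pvFill st.1 "tmdb_original_title" ep, pvFill st.2.1 "tvdb_name" ep,
       pvFill st.2.2.1 "tmdb_title" ep, pvFill st.2.2.2 "series_name" ep))
    (none, none, none, none)
  match st.1 with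
  | some v => v
  | none =>
    match st.2.1 with
    | some v => v
    | none =>
      match st.2.2.1 with
      | some v => v
      | none =>
        match st.2.2.2 with
        | some v => pvTitle v
        | none => "Unknown Series"

-- ===== PRECONDITION & SPEC =====
def Spec_get_series_display_title_py (episodes : List (List (String × String))) (out : String) : Prop := out = get_series_display_title_py_alt episodes
instance (episodes : List (List (String × String))) (out : String) : Decidable (Spec_get_series_display_title_py episodes out) := by unfold Spec_get_series_display_title_py; infer_instance

-- ===== CLAIM (what is proved, stated in full; the proofs are below) =====
def Claim_equal_get_series_display_title_py : Prop := ∀ (episodes : List (List (String × String))), Dom_get_series_display_title_py episodes → Spec_get_series_display_title_py episodes (get_series_display_title_py episodes)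

-- ===== LEMMAS AND PROOFS =====

-- the 4-tuple fold is done componentwise
theorem pv_fold_components (eps : List (List (String × String)))
    (a b c d : Option String) :
    eps.foldl
      (fun (st : Option String × Option String × Option String × Option String) ep =>
        (pvFill st.1 "tmdb_original_title" ep, pvFill st.2.1 "tvdb_name" ep,
         pvFill st.2.2.1 "tmdb_title" ep, pvFill st.2.2.2 "series_name" ep))
      (a, b, c, d)
    = (eps.foldl (fun s ep => pvFill s "tmdb_original_title" ep) a,
       eps.foldl (fun s ep => pvFill s "tvdb_name" ep) b,
       eps.foldl (fun s ep => pvFill s "tmdb_title" ep) c,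
       eps.foldl (fun s ep => pvFill s "series_name" ep) d) := by
  induction eps generalizing a b c d with
  | nil => rfl
  | cons ep rest ih => simp only [List.foldl_cons]; exact ih _ _ _ _

-- a filled slot stays filled
theorem pv_fold_fill_some (k : String) (eps : List (List (String × String))) (v : String) :
    eps.foldl (fun s ep => pvFill s k ep) (some v) = some v := by
  induction eps with
  | nil => rfl
  | cons ep rest ih => simpa [pvFill] using ih

-- folding pvFill from the empty slot is A's first-truthy scan
theorem pv_fold_fill_eq_scanA (k : String) (eps : List (List (String × String))) :
    eps.foldl (fun s ep => pvFill s k ep) none = pvScanA k eps := by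
  induction eps with
  | nil => rfl
  | cons ep rest ih =>
    rw [List.foldl_cons]
    cases h : pvGet k ep with
    | none =>
      have hf : pvFill none k ep = none := by simp [pvFill, h]
      rw [hf, ih]; simp [pvScanA, h]
    | some v =>
      by_cases hv : v = ""
      · have hf : pvFill none k ep = none := by simp [pvFill, h, hv]
        rw [hf, ih]; simp [pvScanA, h, hv]
      · have hf : pvFill none k ep = some v := by simp [pvFill, h, hv]
        rw [hf, pv_fold_fill_some]; simp [pvScanA, h, hv]

-- ===== VERDICT (by name: the statement is the Claim_ definition above) =====
theorem get_series_display_title_py_spec : Claim_equal_get_series_display_title_py := by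
  intro eps _
  unfold Spec_get_series_display_title_py get_series_display_title_py get_series_display_title_py_alt
  rw [pv_fold_components, pv_fold_fill_eq_scanA, pv_fold_fill_eq_scanA,
      pv_fold_fill_eq_scanA, pv_fold_fill_eq_scanA]
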